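-- pv_equiv track=rewrite | github.com/Maximus231/EnglishTutorTelegram | lang.py | obtain_substring_with_extra_word
-- ===== SOURCE A (Python) =====
-- def obtain_substring_with_extra_word(original_string, a, b):
--     # Split the original string into words
--     words = original_string.split()
--
--     # Find the start index of the substring
--     start_index = 0
--     current_char_count = 0
--     for i, word in enumerate(words):
--         if current_char_count + len(word) >= a:
--             start_index = i
--             break
--         current_char_count += len(word) + 1  # Account for the space between words
--
--     # Find the end index of the substring
--     end_index = len(words) - 1
--     current_char_count = 0
--     for i, word in enumerate(words[start_index:], start=start_index):
--         if current_char_count + len(word) >= b: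
--             end_index = i
--             break
--         current_char_count += len(word) + 1  # Account for the space between words
--
--     # Adjust start and end indexes to include one more word from the left and right
--     start_index = max(0, start_index - 1)
--     end_index = min(len(words) - 1, end_index + 1)
--
--     # Construct the new substring
--     new_substring = ' '.join(words[start_index:end_index + 1])
--
--     return new_substring
-- ===== SOURCE B (Python) =====
-- def _bisect_ge(q, t, lo):
--     # first index i >= lo with q[i] >= t, or len(q); q is sorted ascending
--     hi = len(q)
--     while lo < hi:
--         mid = (lo + hi) // 2
--         if q[mid] < t:
--             lo = mid + 1
--         else:
--             hi = mid
--     return lo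
--
--
-- def obtain_substring_with_extra_word(original_string, a, b):
--     words = original_string.split()
--     n = len(words)
--     # prefix array: q[i] = total chars of words[0..i] joined by spaces, plus one
--     q = []
--     total = 0
--     for w in words:
--         total += len(w) + 1
--         q.append(total)
--     i = _bisect_ge(q, a + 1, 0)
--     start_index = i if i < n else 0
--     p_start = q[start_index - 1] if start_index > 0 else 0
--     j = _bisect_ge(q, b + 1 + p_start, start_index)
--     end_index = j if j < n else n - 1
--     start_index = max(0, start_index - 1)
--     end_index = min(n - 1, end_index + 1)
--     return ' '.join(words[start_index:end_index + 1])
-- ===== Notes on version B (the rewrite author's own statement) =====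
-- stated objective: alternative
-- what changed: Replaces A's two linear cumulative-character-count scans over the word list with a prefix-sum array built once and searched by binary search (hand-written bisect_left) for both the start and the end index.
import Mathlib
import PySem

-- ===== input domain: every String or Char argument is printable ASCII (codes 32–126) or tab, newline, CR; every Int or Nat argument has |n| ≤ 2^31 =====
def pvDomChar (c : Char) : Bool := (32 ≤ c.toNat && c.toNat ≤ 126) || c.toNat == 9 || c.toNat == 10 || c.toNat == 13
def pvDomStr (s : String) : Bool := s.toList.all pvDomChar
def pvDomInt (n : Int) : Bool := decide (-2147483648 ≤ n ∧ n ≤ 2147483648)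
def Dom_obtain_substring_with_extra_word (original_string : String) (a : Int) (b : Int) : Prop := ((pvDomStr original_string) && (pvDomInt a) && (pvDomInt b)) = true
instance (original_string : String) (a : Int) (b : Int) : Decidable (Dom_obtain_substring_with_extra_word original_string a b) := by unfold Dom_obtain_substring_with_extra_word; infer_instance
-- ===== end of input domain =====

-- B replaces A's two linear cumulative-count scans by a prefix-sum array searched
-- with a hand-written binary search (bisect); same return value on every input.

-- ===== PORT A =====
-- A's two for-loops share one shape: scan words from index i with running char
-- count cum, break at the first index where cum + len(word) >= thr; none = the
-- loop fell through and the default start/end index is kept.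
def pvFindA (ws : List String) (thr : Int) (i : Nat) (cum : Int) : Option Nat :=
  match ws with
  | [] => none
  | w :: rest =>
    if thr ≤ cum + PySem.Str.len w then some i
    else pvFindA rest thr (i + 1) (cum + PySem.Str.len w + 1)

def obtain_substring_with_extra_word (original_string : String) (a : Int) (b : Int) : String :=
  let words := PySem.Str.split₀ original_string
  let n : Int := (words.length : Int)
  -- first loop: start_index stays 0 when no word reaches a
  let start_index : Nat := (pvFindA words a 0 0).getD 0
  -- second loop over words[start_index:] with a fresh count; default len(words)-1
  let end_index : Int :=
    match pvFindA (words.drop start_index) b start_index 0 with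
    | some k => (k : Int)
    | none => n - 1
  let start' : Int := max 0 ((start_index : Int) - 1)
  let end' : Int := min (n - 1) (end_index + 1)
  PySem.Str.join " " (PySem.List.slice words (some start') (some (end' + 1)))

-- ===== PORT B =====
-- Source B's _bisect_ge while-loop, state (lo, hi); q[mid] via getD (always in range when called)
def pvBisectGe (q : List Int) (t : Int) (lo hi : Nat) : Nat :=
  if h : lo < hi then
    let mid := (lo + hi) / 2
    if q.getD mid 0 < t then pvBisectGe q t (mid + 1) hi
    else pvBisectGe q t lo mid
  else lo
termination_by hi - lo
decreasing_by
  · omega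
  · omega

-- the body of Source B's prefix-building for-loop: total += len(w) + 1; q.append(total)
def pvStep (acc : List Int × Int) (w : String) : List Int × Int :=
  (acc.1 ++ [acc.2 + PySem.Str.len w + 1], acc.2 + PySem.Str.len w + 1)

def obtain_substring_with_extra_word_alt (original_string : String) (a : Int) (b : Int) : String :=
  let words := PySem.Str.split₀ original_string
  let n := words.length
  let q : List Int := (words.foldl pvStep ([], 0)).1
  let i := pvBisectGe q (a + 1) 0 q.length
  let start_index := if i < n then i else 0
  let p_start : Int := if 0 < start_index then q.getD (start_index - 1) 0 else 0
  let j := pvBisectGe q (b + 1 + p_start) start_index q.length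
  let end_index : Int := if j < n then (j : Int) else (n : Int) - 1
  let start' : Int := max 0 ((start_index : Int) - 1)
  let end' : Int := min ((n : Int) - 1) (end_index + 1)
  PySem.Str.join " " (PySem.List.slice words (some start') (some (end' + 1)))

-- ===== PRECONDITION & SPEC =====
def Spec_obtain_substring_with_extra_word (original_string : String) (a : Int) (b : Int) (out : String) : Prop := out = obtain_substring_with_extra_word_alt original_string a b
instance (original_string : String) (a : Int) (b : Int) (out : String) : Decidable (Spec_obtain_substring_with_extra_word original_string a b out) := by unfold Spec_obtain_substring_with_extra_word; infer_instance

-- ===== CLAIM (what is proved, stated in full; the proofs are below) =====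
def Claim_equal_obtain_substring_with_extra_word : Prop := ∀ (original_string : String) (a : Int) (b : Int), Dom_obtain_substring_with_extra_word original_string a b → Spec_obtain_substring_with_extra_word original_string a b (obtain_substring_with_extra_word original_string a b)

-- ===== LEMMAS AND PROOFS =====

-- prefix character counts: pvP W k = sum of len(w)+1 over the first k words
def pvP (W : List String) (k : Nat) : Int :=
  ((W.take k).map (fun w => PySem.Str.len w + 1)).sum

-- the prefix list Source B's for-loop builds, started at running total c
def pvQaux (ws : List String) (c : Int) : List Int :=
  match ws with
  | [] => []
  | w :: rest => (c + PySem.Str.len w + 1) :: pvQaux rest (c + PySem.Str.len w + 1)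

-- reference linear search: least k ≥ i with t ≤ q[k], else q.length
def pvLeast (q : List Int) (t : Int) (i : Nat) : Nat :=
  if h : i < q.length then
    if t ≤ q.getD i 0 then i else pvLeast q t (i + 1)
  else q.length
termination_by q.length - i

lemma pvQaux_length (ws : List String) (c : Int) : (pvQaux ws c).length = ws.length := by
  induction ws generalizing c with
  | nil => rfl
  | cons w rest ih => simp [pvQaux, ih]

lemma pvP_zero (W : List String) : pvP W 0 = 0 := by simp [pvP]

lemma pvP_cons_succ (w : String) (r : List String) (k : Nat) :
    pvP (w :: r) (k + 1) = PySem.Str.len w + 1 + pvP r k := by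
  simp [pvP, List.take_succ_cons]

lemma pvQaux_getD (ws : List String) (c : Int) (k : Nat) (hk : k < ws.length) :
    (pvQaux ws c).getD k 0 = c + pvP ws (k + 1) := by
  induction ws generalizing c k with
  | nil => simp at hk
  | cons w rest ih =>
    cases k with
    | zero => simp [pvQaux, pvP_cons_succ, pvP_zero]; ring
    | succ k =>
      simp only [pvQaux, List.getD_cons_succ]
      rw [ih _ k (by simpa using hk), pvP_cons_succ]
      ring

lemma pvFoldl_q (ws : List String) (acc : List Int) (c : Int) :
    (ws.foldl pvStep (acc, c)).1 = acc ++ pvQaux ws c := by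
  induction ws generalizing acc c with
  | nil => simp [pvQaux]
  | cons w rest ih =>
    rw [List.foldl_cons, pvQaux]
    show (rest.foldl pvStep (acc ++ [c + PySem.Str.len w + 1], c + PySem.Str.len w + 1)).1 = _
    rw [ih]
    simp

lemma pvP_succ (W : List String) (k : Nat) (hk : k < W.length) :
    pvP W (k + 1) = pvP W k + PySem.Str.len W[k] + 1 := by
  induction W generalizing k with
  | nil => simp at hk
  | cons w r ih =>
    cases k with
    | zero => simp [pvP_cons_succ, pvP_zero]
    | succ k =>
      rw [pvP_cons_succ, pvP_cons_succ, ih k (by simpa using hk)]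
      simp
      ring

lemma pvP_mono (W : List String) (i j : Nat) (hij : i ≤ j) (hj : j ≤ W.length) :
    pvP W i ≤ pvP W j := by
  induction j with
  | zero =>
    have : i = 0 := by omega
    simp [this]
  | succ j ih =>
    rcases Nat.lt_or_ge i (j + 1) with h | h
    · have h1 := ih (by omega) (by omega)
      have hs := pvP_succ W j (by omega)
      have hlen : (0:Int) ≤ PySem.Str.len W[j] := by
        rw [PySem.Str.len_eq]; positivity
      omega
    · have : i = j + 1 := by omega
      simp [this]

lemma pvQaux_mono (W : List String) (i j : Nat) (hij : i ≤ j) (hj : j < (pvQaux W 0).length) :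
    (pvQaux W 0).getD i 0 ≤ (pvQaux W 0).getD j 0 := by
  rw [pvQaux_length] at hj
  rw [pvQaux_getD W 0 i (by omega), pvQaux_getD W 0 j hj]
  have := pvP_mono W (i + 1) (j + 1) (by omega) (by omega)
  omega

lemma pvLeast_ge (q : List Int) (t : Int) :
    ∀ i, i ≤ q.length → i ≤ pvLeast q t i ∧ pvLeast q t i ≤ q.length := by
  have key : ∀ d i, q.length - i ≤ d → i ≤ q.length →
      i ≤ pvLeast q t i ∧ pvLeast q t i ≤ q.length := by
    intro d
    induction d with
    | zero =>
      intro i h1 h2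
      have hni : ¬ i < q.length := by omega
      rw [pvLeast]; simp [hni]; omega
    | succ d ih =>
      intro i h1 h2
      rw [pvLeast]
      by_cases hi : i < q.length
      · rw [dif_pos hi]
        by_cases ht : t ≤ q.getD i 0
        · rw [if_pos ht]; omega
        · rw [if_neg ht]
          have := ih (i + 1) (by omega) (by omega)
          omega
      · rw [dif_neg hi]; omega
  intro i h
  exact key (q.length - i) i le_rfl h

lemma pvLeast_self (q : List Int) (t : Int) (i : Nat) (h1 : i ≤ q.length)
    (h2 : i < q.length → t ≤ q.getD i 0) : pvLeast q t i = i := by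
  rw [pvLeast]
  by_cases hi : i < q.length
  · rw [dif_pos hi, if_pos (h2 hi)]
  · rw [dif_neg hi]; omega

lemma pvLeast_skip (q : List Int) (t : Int) (lo m : Nat) (hm : m ≤ q.length)
    (hlom : lo ≤ m) (hno : ∀ k, lo ≤ k → k < m → ¬ t ≤ q.getD k 0) :
    pvLeast q t lo = pvLeast q t m := by
  induction m with
  | zero =>
    have : lo = 0 := by omega
    simp [this]
  | succ m ih =>
    rcases Nat.lt_or_ge lo (m + 1) with h | h
    · have h1 : pvLeast q t lo = pvLeast q t m := ih (by omega) (by omega)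
        (fun k hk hk' => hno k hk (by omega))
      have h2 : pvLeast q t m = pvLeast q t (m + 1) := by
        conv_lhs => rw [pvLeast]
        rw [dif_pos (show m < q.length by omega), if_neg (hno m (by omega) (by omega))]
      rw [h1, h2]
    · have : lo = m + 1 := by omega
      simp [this]

lemma pvBisect_eq_least (q : List Int) (t : Int)
    (hmono : ∀ i j, i ≤ j → j < q.length → q.getD i 0 ≤ q.getD j 0) :
    ∀ d lo hi, hi - lo ≤ d → lo ≤ hi → hi ≤ q.length →
    (∀ k, hi ≤ k → k < q.length → t ≤ q.getD k 0) →
    pvBisectGe q t lo hi = pvLeast q t lo := by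
  intro d
  induction d with
  | zero =>
    intro lo hi h1 h2 h3 h4
    have hlh : lo = hi := by omega
    rw [pvBisectGe]
    simp only [show ¬ lo < hi by omega, dif_neg, not_false_iff]
    subst hlh
    exact (pvLeast_self q t lo h3 (fun hlt => h4 lo le_rfl hlt)).symm
  | succ d ih =>
    intro lo hi h1 h2 h3 h4
    rw [pvBisectGe]
    by_cases hlt : lo < hi
    · simp only [hlt, dif_pos]
      by_cases hq : q.getD ((lo + hi) / 2) 0 < t
      · simp only [hq, if_true]
        rw [ih ((lo + hi) / 2 + 1) hi (by omega) (by omega) h3 h4]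
        refine (pvLeast_skip q t lo ((lo + hi) / 2 + 1) (by omega) (by omega) ?_).symm
        intro k hk1 hk2
        have := hmono k ((lo + hi) / 2) (by omega) (by omega)
        omega
      · simp only [hq, if_false]
        refine ih lo ((lo + hi) / 2) (by omega) (by omega) (by omega) ?_
        intro k hk1 hk2
        have := hmono ((lo + hi) / 2) k hk1 hk2
        omega
    · simp only [hlt, dif_neg, not_false_iff]
      have hlh : lo = hi := by omega
      subst hlh
      exact (pvLeast_self q t lo h3 (fun h => h4 lo le_rfl h)).symm

lemma pvFindA_eq (W : List String) :
    ∀ d i, W.length - i ≤ d → i ≤ W.length → ∀ (c thr : Int),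
    pvFindA (W.drop i) thr i c =
      (if pvLeast (pvQaux W 0) (thr - c + pvP W i + 1) i < W.length
       then some (pvLeast (pvQaux W 0) (thr - c + pvP W i + 1) i)
       else none) := by
  intro d
  induction d with
  | zero =>
    intro i h1 h2 c thr
    have hieq : i = W.length := by omega
    have hdrop : W.drop i = [] := by simp [hieq]
    rw [hdrop]
    have : pvLeast (pvQaux W 0) (thr - c + pvP W i + 1) i = W.length := by
      have := pvLeast_self (pvQaux W 0) (thr - c + pvP W i + 1) i
        (by rw [pvQaux_length]; omega)
        (fun h => absurd h (by rw [pvQaux_length]; omega))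
      omega
    simp [pvFindA, this]
  | succ d ih =>
    intro i h1 h2 c thr
    by_cases hi : i < W.length
    · rw [List.drop_eq_getElem_cons hi, pvFindA]
      have hql : (pvQaux W 0).length = W.length := pvQaux_length W 0
      have hqi : (pvQaux W 0).getD i 0 = pvP W (i + 1) := by
        rw [pvQaux_getD W 0 i hi]; ring
      have hps := pvP_succ W i hi
      by_cases hc : thr ≤ c + PySem.Str.len W[i]
      · have hL : pvLeast (pvQaux W 0) (thr - c + pvP W i + 1) i = i := by
          apply pvLeast_self _ _ _ (by omega)
          intro _
          rw [hqi]; omega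
        rw [if_pos hc, hL, if_pos hi]
      · have hstep : pvLeast (pvQaux W 0) (thr - c + pvP W i + 1) i
            = pvLeast (pvQaux W 0) (thr - c + pvP W i + 1) (i + 1) := by
          apply pvLeast_skip _ _ _ _ (by omega) (by omega)
          intro k hk1 hk2
          have hkk : k = i := by omega
          subst hkk
          rw [hqi]; omega
        have harg : thr - (c + PySem.Str.len W[i] + 1) + pvP W (i + 1) + 1
            = thr - c + pvP W i + 1 := by omega
        rw [if_neg hc, ih (i + 1) (by omega) (by omega) (c + PySem.Str.len W[i] + 1) thr,
          harg, ← hstep]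
    · have hieq : i = W.length := by omega
      have hdrop : W.drop i = [] := by simp [hieq]
      rw [hdrop]
      have : pvLeast (pvQaux W 0) (thr - c + pvP W i + 1) i = W.length := by
        have := pvLeast_self (pvQaux W 0) (thr - c + pvP W i + 1) i
          (by rw [pvQaux_length]; omega) (by rw [pvQaux_length]; omega)
        omega
      simp [pvFindA, this]

-- the two port bodies agree for every word list W
lemma pvMain (W : List String) (a b : Int) :
    (let n : Int := (W.length : Int)
     let start_index : Nat := (pvFindA W a 0 0).getD 0
     let end_index : Int :=
       match pvFindA (W.drop start_index) b start_index 0 with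
       | some k => (k : Int)
       | none => n - 1
     let start' : Int := max 0 ((start_index : Int) - 1)
     let end' : Int := min (n - 1) (end_index + 1)
     PySem.Str.join " " (PySem.List.slice W (some start') (some (end' + 1))))
    =
    (let n := W.length
     let q : List Int := (W.foldl pvStep ([], 0)).1
     let i := pvBisectGe q (a + 1) 0 q.length
     let start_index := if i < n then i else 0
     let p_start : Int := if 0 < start_index then q.getD (start_index - 1) 0 else 0
     let j := pvBisectGe q (b + 1 + p_start) start_index q.length
     let end_index : Int := if j < n then (j : Int) else (n : Int) - 1
     let start' : Int := max 0 ((start_index : Int) - 1)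
     let end' : Int := min ((n : Int) - 1) (end_index + 1)
     PySem.Str.join " " (PySem.List.slice W (some start') (some (end' + 1)))) := by
  have hq : (W.foldl pvStep ([], 0)).1 = pvQaux W 0 := by
    simpa using pvFoldl_q W [] 0
  have hql : (pvQaux W 0).length = W.length := pvQaux_length W 0
  have hmono : ∀ i j, i ≤ j → j < (pvQaux W 0).length →
      (pvQaux W 0).getD i 0 ≤ (pvQaux W 0).getD j 0 := by
    intro i j hij hj
    exact pvQaux_mono W i j hij (by omega)
  have hbis1 : pvBisectGe (pvQaux W 0) (a + 1) 0 W.length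
      = pvLeast (pvQaux W 0) (a + 1) 0 := by
    rw [← hql]
    exact pvBisect_eq_least _ _ hmono (pvQaux W 0).length 0 _ (by omega) (by omega) le_rfl
      (fun k hk hk' => absurd hk' (by omega))
  set L0 := pvLeast (pvQaux W 0) (a + 1) 0 with hL0
  have hL0b : 0 ≤ L0 ∧ L0 ≤ (pvQaux W 0).length := pvLeast_ge (pvQaux W 0) (a + 1) 0 (by omega)
  have hfind1 : pvFindA W a 0 0 = if L0 < W.length then some L0 else none := by
    have h := pvFindA_eq W W.length 0 (by omega) (by omega) 0 a
    have harg : a - 0 + pvP W 0 + 1 = a + 1 := by rw [pvP_zero]; ring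
    rw [harg] at h
    simpa using h
  set s0 : Nat := if L0 < W.length then L0 else 0 with hs0
  have hstartA : (pvFindA W a 0 0).getD 0 = s0 := by
    rw [hfind1, hs0]
    by_cases h : L0 < W.length <;> simp [h]
  have hs0le : s0 ≤ W.length := by
    rw [hs0]; split <;> omega
  have hps : (if 0 < s0 then (pvQaux W 0).getD (s0 - 1) 0 else 0) = pvP W s0 := by
    by_cases h : 0 < s0
    · have hs0lt : s0 < W.length := by
        rw [hs0] at h ⊢
        by_cases hL : L0 < W.length
        · simp [hL]
        · simp [hL] at h
      rw [if_pos h, pvQaux_getD W 0 (s0 - 1) (by omega),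
        show s0 - 1 + 1 = s0 by omega]
      ring
    · rw [if_neg h, show s0 = 0 by omega, pvP_zero]
  have hbis2 : pvBisectGe (pvQaux W 0) (b + 1 + pvP W s0) s0 W.length
      = pvLeast (pvQaux W 0) (b + 1 + pvP W s0) s0 := by
    rw [← hql]
    exact pvBisect_eq_least _ _ hmono (pvQaux W 0).length s0 _ (by omega) (by omega) le_rfl
      (fun k hk hk' => absurd hk' (by omega))
  set L1 := pvLeast (pvQaux W 0) (b + 1 + pvP W s0) s0 with hL1
  have hfind2 : pvFindA (W.drop s0) b s0 0 = if L1 < W.length then some L1 else none := by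
    have h := pvFindA_eq W W.length s0 (by omega) hs0le 0 b
    have harg : b - 0 + pvP W s0 + 1 = b + 1 + pvP W s0 := by ring
    rw [harg] at h
    exact h
  simp only [hq, hql, hstartA, hfind2, hbis1, ← hs0, hps, hbis2]
  by_cases hc : L1 < W.length <;> simp [hc]

-- ===== VERDICT (by name: the statement is the Claim_ definition above) =====
theorem obtain_substring_with_extra_word_spec : Claim_equal_obtain_substring_with_extra_word := by
  intro s a b _
  show obtain_substring_with_extra_word s a b = obtain_substring_with_extra_word_alt s a b
  exact pvMain (PySem.Str.split₀ s) a b
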